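-- pv_equiv track=rewrite | github.com/pypi-data/pypi-mirror-151 | packages/dataUncert/dataUncert-2.6.tar.gz/dataUncert-2.6/dataUncert/unitSystem.py | _splitCompositeUnit
-- ===== SOURCE A (Python) =====
-- def _splitCompositeUnit(compositeUnit):
--
--     special_characters = """!@#$%^&*()+?_=.,<>\\"""
--     if any(s in compositeUnit for s in special_characters):
--         raise ValueError('The unit can only contain slashes (/), hyphens (-)')
--
--     # remove spaces
--     compositeUnit = compositeUnit.replace(' ', '')
--     slash = '/'
--     if slash in compositeUnit:
--         index = compositeUnit.find('/')
--         upper = compositeUnit[0:index]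
--         lower = compositeUnit[index + 1:]
--
--         # check for multiple slashes
--         if slash in upper or slash in lower:
--             raise ValueError('A unit can only have a single slash (/)')
--
--         # split the upper and lower
--         upper = upper.split('-')
--         lower = lower.split('-')
--
--     else:
--         upper = compositeUnit.split('-')
--         lower = []
--     return upper, lower
-- ===== SOURCE B (Python) =====
-- def _splitCompositeUnit(compositeUnit):
--
--     special_characters = """!@#$%^&*()+?_=.,<>\\"""
--     # single left-to-right pass: a small state machine with a current-token
--     # accumulator, instead of A's staged passes (check / replace / find / slice / split)
--     upper, lower, cur, seen_slash = [], [], '', False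
--     for ch in compositeUnit:
--         if ch in special_characters:
--             raise ValueError('The unit can only contain slashes (/), hyphens (-)')
--         elif ch == ' ':
--             continue
--         elif ch == '/':
--             if seen_slash:
--                 raise ValueError('A unit can only have a single slash (/)')
--             upper.append(cur)
--             cur = ''
--             seen_slash = True
--         elif ch == '-':
--             if seen_slash:
--                 lower.append(cur)
--             else:
--                 upper.append(cur)
--             cur = ''
--         else:
--             cur += ch
--     if seen_slash:
--         lower.append(cur)
--     else:
--         upper.append(cur)
--     return upper, lower
-- ===== Notes on version B (the rewrite author's own statement) =====
-- stated objective: alternative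
-- what changed: B is a single left-to-right character scan with a current-token accumulator and a seen-slash flag, replacing A's staged passes (whole-string special-character check, space replace, find, two slices, membership recheck, two splits); the validation and tokenisation happen in one traversal.
import Mathlib
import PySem

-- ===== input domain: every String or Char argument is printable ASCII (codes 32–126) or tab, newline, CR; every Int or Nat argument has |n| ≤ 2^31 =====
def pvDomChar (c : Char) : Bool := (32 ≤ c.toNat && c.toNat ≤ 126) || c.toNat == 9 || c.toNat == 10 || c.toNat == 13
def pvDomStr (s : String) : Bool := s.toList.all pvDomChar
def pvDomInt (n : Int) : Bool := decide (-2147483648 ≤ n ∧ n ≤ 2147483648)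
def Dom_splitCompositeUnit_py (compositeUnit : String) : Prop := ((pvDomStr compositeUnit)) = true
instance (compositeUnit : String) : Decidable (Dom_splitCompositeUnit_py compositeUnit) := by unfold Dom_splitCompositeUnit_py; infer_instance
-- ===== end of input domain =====

-- B replaces A's staged passes (special-char check, space replace, find, slices, splits)
-- with one left-to-right scan carrying a current-token accumulator and a seen-slash flag
-- (objective: alternative single-pass decomposition, same cost).

def pvSpecials : List Char := "!@#$%^&*()+?_=.,<>\\".toList

-- ===== PORT A =====
-- Python s.split(sep) for the non-empty literal separator used by A
def pySplit (s sep : String) : List String :=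
  (PySem.Chars.splitOn s.toList sep.toList).map String.ofList

def splitCompositeUnit_py (compositeUnit : String) : List String × List String :=
  if pvSpecials.any (fun ch => PySem.Str.isIn (String.ofList [ch]) compositeUnit) then
    ([], [])  -- raise ValueError: excluded by Pre_
  else
    let s := PySem.Str.replace compositeUnit " " ""
    if PySem.Str.isIn "/" s then
      let index := PySem.Str.find s "/"
      let upper := PySem.Str.slice s (some 0) (some index)
      let lower := PySem.Str.slice s (some (index + 1)) none
      if PySem.Str.isIn "/" upper || PySem.Str.isIn "/" lower then
        ([], [])  -- raise ValueError: excluded by Pre_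
      else
        (pySplit upper "-", pySplit lower "-")
    else
      (pySplit s "-", [])

-- ===== PORT B =====
-- the scan's state: upper tokens, lower tokens, current token, seen-slash flag;
-- none = the scan raised ValueError (excluded by Pre_)
def altScan : List Char → List String → List String → List Char → Bool →
    Option (List String × List String)
  | [], up, lo, cur, seen =>
      if seen then some (up, lo ++ [String.ofList cur])
      else some (up ++ [String.ofList cur], lo)
  | c :: rest, up, lo, cur, seen =>
      if c ∈ pvSpecials then none  -- raise ValueError (special character)
      else if c = ' ' then altScan rest up lo cur seen
      else if c = '/' then
        if seen then none  -- raise ValueError (second slash)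
        else altScan rest (up ++ [String.ofList cur]) lo [] true
      else if c = '-' then
        if seen then altScan rest up (lo ++ [String.ofList cur]) [] true
        else altScan rest (up ++ [String.ofList cur]) lo [] false
      else altScan rest up lo (cur ++ [c]) seen

def splitCompositeUnit_py_alt (compositeUnit : String) : List String × List String :=
  match altScan compositeUnit.toList [] [] [] false with
  | some r => r
  | none => ([], [])  -- raise ValueError: excluded by Pre_

-- ===== PRECONDITION & SPEC =====
-- Pre_ excludes exactly the inputs on which A raises ValueError (and B raises too):
-- strings containing a special character, and strings with two or more slashes.
def Pre_splitCompositeUnit_py (compositeUnit : String) : Prop :=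
  (pvSpecials.all (fun ch => !(compositeUnit.toList.contains ch)) = true) ∧
    compositeUnit.toList.count '/' ≤ 1
instance (compositeUnit : String) : Decidable (Pre_splitCompositeUnit_py compositeUnit) := by
  unfold Pre_splitCompositeUnit_py; infer_instance

def pvWitness_splitCompositeUnit_py : String := "kg-m/s"

def Spec_splitCompositeUnit_py (compositeUnit : String) (out : List String × List String) : Prop :=
  out = splitCompositeUnit_py_alt compositeUnit
instance (compositeUnit : String) (out : List String × List String) :
    Decidable (Spec_splitCompositeUnit_py compositeUnit out) := by
  unfold Spec_splitCompositeUnit_py; infer_instance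

-- ===== CLAIM (what is proved, stated in full; the proofs are below) =====
def Claim_equal_splitCompositeUnit_py : Prop :=
  ∀ (compositeUnit : String), Dom_splitCompositeUnit_py compositeUnit →
    Pre_splitCompositeUnit_py compositeUnit →
    Spec_splitCompositeUnit_py compositeUnit (splitCompositeUnit_py compositeUnit)

-- ===== LEMMAS AND PROOFS =====

theorem isPrefixOf_singleton (c d : Char) (t : List Char) :
    [c].isPrefixOf (d :: t) = (c == d) := by
  simp [List.isPrefixOf]

-- single-character membership: `c in s`
theorem isIn_singleton (c : Char) (cs : List Char) :
    PySem.Chars.isIn [c] cs = true ↔ c ∈ cs := by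
  rw [PySem.Chars.isIn_iff_infix]
  constructor
  · intro h; exact h.mem (List.mem_singleton_self c)
  · intro h
    obtain ⟨u, v, rfl⟩ := List.append_of_mem h
    exact ⟨u, v, by simp⟩

theorem isIn_singleton_eq_false (c : Char) (cs : List Char) (h : c ∉ cs) :
    PySem.Chars.isIn [c] cs = false := by
  cases hb : PySem.Chars.isIn [c] cs
  · rfl
  · exact absurd ((isIn_singleton c cs).mp hb) h

-- replacing a single character by the empty string is filtering it out
theorem replace_go_filter (c : Char) :
    ∀ (fuel : Nat) (l acc : List Char), l.length ≤ fuel →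
      PySem.Chars.replace.go [c] [] fuel l acc = acc.reverse ++ l.filter (fun d => !(d == c)) := by
  intro fuel
  induction fuel with
  | zero =>
    intro l acc h
    have hl : l = [] := List.eq_nil_of_length_eq_zero (by omega)
    subst hl
    simp [PySem.Chars.replace.go]
  | succ n ih =>
    intro l acc h
    cases l with
    | nil => simp [PySem.Chars.replace.go]
    | cons d t =>
      simp only [PySem.Chars.replace.go, isPrefixOf_singleton]
      by_cases hd : d = c
      · subst hd
        rw [if_pos (by simp)]
        simp only [List.length_singleton, List.drop_one, List.tail_cons]
        rw [ih t _ (by simpa using h)]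
        simp
      · rw [if_neg (by simp [Ne.symm hd])]
        rw [ih t _ (by simpa using h)]
        simp [hd]

theorem replace_single_empty (c : Char) (cs : List Char) :
    PySem.Chars.replace cs [c] [] = cs.filter (fun d => !(d == c)) := by
  simp only [PySem.Chars.replace]
  rw [if_neg (by simp)]
  simpa using replace_go_filter c cs.length cs [] le_rfl

-- the reference splitter for a single-character separator
def mySplit (c : Char) : List Char → List Char → List (List Char)
  | [], cur => [cur.reverse]
  | d :: rest, cur =>
      if d = c then cur.reverse :: mySplit c rest [] else mySplit c rest (d :: cur)

theorem splitOn_go_mySplit (c : Char) :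
    ∀ (fuel : Nat) (l cur : List Char) (acc : List (List Char)), l.length < fuel →
      PySem.Chars.splitOn.go [c] fuel l cur acc = acc.reverse ++ mySplit c l cur := by
  intro fuel
  induction fuel with
  | zero => intro l cur acc h; exact absurd h (by omega)
  | succ n ih =>
    intro l cur acc h
    cases l with
    | nil => simp [PySem.Chars.splitOn.go, mySplit]
    | cons d t =>
      simp only [PySem.Chars.splitOn.go, isPrefixOf_singleton, mySplit]
      by_cases hd : d = c
      · subst hd
        rw [if_pos (by simp), if_pos rfl]
        simp only [List.length_singleton, List.drop_one, List.tail_cons]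
        rw [ih t [] _ (by simpa using h)]
        simp
      · rw [if_neg (by simp [Ne.symm hd]), if_neg hd]
        exact ih t (d :: cur) acc (by simpa using h)

theorem splitOn_eq_mySplit (c : Char) (cs : List Char) :
    PySem.Chars.splitOn cs [c] = mySplit c cs [] := by
  simpa using splitOn_go_mySplit c (cs.length + 1) cs [] [] (by omega)

-- find of a single character not preceded by itself
theorem find_go_append (c : Char) :
    ∀ (u v : List Char) (k : Nat), c ∉ u →
      PySem.Chars.find.go [c] (u ++ c :: v) k = (k : Int) + u.length := by
  intro u
  induction u with
  | nil => intro v k _; simp [PySem.Chars.find.go, List.isPrefixOf]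
  | cons d t ih =>
    intro v k h
    have hd : ¬ d = c := fun hdc => h (by simp [hdc])
    simp only [List.cons_append, PySem.Chars.find.go, isPrefixOf_singleton]
    rw [if_neg (by simp [Ne.symm hd])]
    rw [ih v (k + 1) (fun hm => h (List.mem_cons_of_mem d hm))]
    simp only [List.length_cons]
    push_cast
    omega

theorem find_append (c : Char) (u v : List Char) (h : c ∉ u) :
    PySem.Chars.find (u ++ c :: v) [c] = (u.length : Int) := by
  simpa using find_go_append c u v 0 h

-- a list with at most one occurrence of c containing c splits uniquely at c
theorem exists_unique_split (c : Char) :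
    ∀ (l : List Char), l.count c ≤ 1 → c ∈ l →
      ∃ u v, l = u ++ c :: v ∧ c ∉ u ∧ c ∉ v := by
  intro l
  induction l with
  | nil => intro _ h; simp at h
  | cons d t ih =>
    intro hc hm
    by_cases hd : d = c
    · subst hd
      refine ⟨[], t, by simp, by simp, ?_⟩
      rw [List.count_cons_self] at hc
      exact List.count_eq_zero.mp (by omega)
    · have hmt : c ∈ t := by
        rcases List.mem_cons.mp hm with h1 | h1
        · exact absurd h1.symm hd
        · exact h1
      have hct : t.count c ≤ 1 := by
        simpa [List.count_cons, hd] using hc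
      obtain ⟨u, v, rfl, hu, hv⟩ := ih hct hmt
      exact ⟨d :: u, v, by simp, by simp [hu, Ne.symm hd], hv⟩

-- the guards of A: special characters
theorem specials_guard_false (compositeUnit : String)
    (h : ∀ ch ∈ pvSpecials, ch ∉ compositeUnit.toList) :
    pvSpecials.any (fun ch => PySem.Str.isIn (String.ofList [ch]) compositeUnit) = false := by
  rw [List.any_eq_false]
  intro ch hch
  simp only [PySem.Str.isIn, String.toList_ofList]
  intro hcontra
  exact h ch hch ((isIn_singleton ch compositeUnit.toList).mp hcontra)

theorem slash_toList : ("/" : String).toList = ['/'] := by decide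
theorem dash_toList : ("-" : String).toList = ['-'] := by decide

-- B's scan ignores spaces: it equals the scan of the space-filtered list
theorem altScan_filter :
    ∀ (l : List Char) (up lo : List String) (cur : List Char) (seen : Bool),
      altScan l up lo cur seen =
        altScan (l.filter (fun c => !(c == ' '))) up lo cur seen := by
  intro l
  induction l with
  | nil => intro up lo cur seen; rfl
  | cons c rest ih =>
    intro up lo cur seen
    by_cases hsp : c = ' '
    · subst hsp
      rw [show ((' ' :: rest).filter (fun c => !(c == ' '))) = rest.filter (fun c => !(c == ' '))
            from by simp]
      rw [show altScan (' ' :: rest) up lo cur seen = altScan rest up lo cur seen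
            from by simp [altScan, show (' ' ∉ pvSpecials) from by decide]]
      exact ih up lo cur seen
    · rw [show ((c :: rest).filter (fun c => !(c == ' '))) =
            c :: rest.filter (fun c => !(c == ' ')) from by simp [hsp]]
      simp only [altScan]
      split_ifs <;> first | rfl | apply ih

-- scanning a clean slash-free list with seen = false appends its dash-tokens to upper
theorem altScan_noSlash_false :
    ∀ (l : List Char) (up lo : List String) (cur : List Char),
      (∀ c ∈ l, c ∉ pvSpecials) → (∀ c ∈ l, c ≠ ' ') → '/' ∉ l →
      altScan l up lo cur false =
        some (up ++ (mySplit '-' l cur.reverse).map String.ofList, lo) := by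
  intro l
  induction l with
  | nil => intro up lo cur _ _ _; simp [altScan, mySplit]
  | cons c rest ih =>
    intro up lo cur hspec hsp hsl
    have h1 : c ∉ pvSpecials := hspec c (by simp)
    have h2 : c ≠ ' ' := hsp c (by simp)
    have h3 : c ≠ '/' := fun h => hsl (by simp [h])
    have hspec' : ∀ d ∈ rest, d ∉ pvSpecials := fun d hd => hspec d (by simp [hd])
    have hsp' : ∀ d ∈ rest, d ≠ ' ' := fun d hd => hsp d (by simp [hd])
    have hsl' : '/' ∉ rest := fun h => hsl (by simp [h])
    by_cases hc : c = '-'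
    · subst hc
      rw [show altScan ('-' :: rest) up lo cur false =
            altScan rest (up ++ [String.ofList cur]) lo [] false
          from by simp [altScan, h1]]
      rw [ih _ lo [] hspec' hsp' hsl']
      simp [mySplit]
    · rw [show altScan (c :: rest) up lo cur false =
            altScan rest up lo (cur ++ [c]) false
          from by simp [altScan, h1, h2, h3, hc]]
      rw [ih up lo (cur ++ [c]) hspec' hsp' hsl']
      simp [mySplit, hc]

-- scanning a clean slash-free list with seen = true appends its dash-tokens to lower
theorem altScan_noSlash_true :
    ∀ (l : List Char) (up lo : List String) (cur : List Char),
      (∀ c ∈ l, c ∉ pvSpecials) → (∀ c ∈ l, c ≠ ' ') → '/' ∉ l →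
      altScan l up lo cur true =
        some (up, lo ++ (mySplit '-' l cur.reverse).map String.ofList) := by
  intro l
  induction l with
  | nil => intro up lo cur _ _ _; simp [altScan, mySplit]
  | cons c rest ih =>
    intro up lo cur hspec hsp hsl
    have h1 : c ∉ pvSpecials := hspec c (by simp)
    have h2 : c ≠ ' ' := hsp c (by simp)
    have h3 : c ≠ '/' := fun h => hsl (by simp [h])
    have hspec' : ∀ d ∈ rest, d ∉ pvSpecials := fun d hd => hspec d (by simp [hd])
    have hsp' : ∀ d ∈ rest, d ≠ ' ' := fun d hd => hsp d (by simp [hd])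
    have hsl' : '/' ∉ rest := fun h => hsl (by simp [h])
    by_cases hc : c = '-'
    · subst hc
      rw [show altScan ('-' :: rest) up lo cur true =
            altScan rest up (lo ++ [String.ofList cur]) [] true
          from by simp [altScan, h1]]
      rw [ih up _ [] hspec' hsp' hsl']
      simp [mySplit]
    · rw [show altScan (c :: rest) up lo cur true =
            altScan rest up lo (cur ++ [c]) true
          from by simp [altScan, h1, h2, h3, hc]]
      rw [ih up lo (cur ++ [c]) hspec' hsp' hsl']
      simp [mySplit, hc]

-- scanning a clean list with exactly one slash
theorem altScan_slash :
    ∀ (u v : List Char) (up lo : List String) (cur : List Char),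
      (∀ c ∈ u, c ∉ pvSpecials) → (∀ c ∈ u, c ≠ ' ') → '/' ∉ u →
      (∀ c ∈ v, c ∉ pvSpecials) → (∀ c ∈ v, c ≠ ' ') → '/' ∉ v →
      altScan (u ++ '/' :: v) up lo cur false =
        some (up ++ (mySplit '-' u cur.reverse).map String.ofList,
              lo ++ (mySplit '-' v []).map String.ofList) := by
  intro u
  induction u with
  | nil =>
    intro v up lo cur _ _ _ hv1 hv2 hv3
    rw [show altScan ([] ++ '/' :: v) up lo cur false =
          altScan v (up ++ [String.ofList cur]) lo [] true
        from by simp [altScan, show ('/' ∉ pvSpecials) from by decide]]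
    rw [altScan_noSlash_true v _ lo [] hv1 hv2 hv3]
    simp [mySplit]
  | cons c rest ih =>
    intro v up lo cur hspec hsp hsl hv1 hv2 hv3
    have h1 : c ∉ pvSpecials := hspec c (by simp)
    have h2 : c ≠ ' ' := hsp c (by simp)
    have h3 : c ≠ '/' := fun h => hsl (by simp [h])
    have hspec' : ∀ d ∈ rest, d ∉ pvSpecials := fun d hd => hspec d (by simp [hd])
    have hsp' : ∀ d ∈ rest, d ≠ ' ' := fun d hd => hsp d (by simp [hd])
    have hsl' : '/' ∉ rest := fun h => hsl (by simp [h])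
    by_cases hc : c = '-'
    · subst hc
      rw [show altScan (('-' :: rest) ++ '/' :: v) up lo cur false =
            altScan (rest ++ '/' :: v) (up ++ [String.ofList cur]) lo [] false
          from by simp [altScan, h1]]
      rw [ih v _ lo [] hspec' hsp' hsl' hv1 hv2 hv3]
      simp [mySplit]
    · rw [show altScan ((c :: rest) ++ '/' :: v) up lo cur false =
            altScan (rest ++ '/' :: v) up lo (cur ++ [c]) false
          from by simp [altScan, h1, h2, h3, hc]]
      rw [ih v up lo (cur ++ [c]) hspec' hsp' hsl' hv1 hv2 hv3]
      simp [mySplit, hc]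

-- ===== VERDICT (by name: the statement is the Claim_ definition above) =====
theorem splitCompositeUnit_py_spec : Claim_equal_splitCompositeUnit_py := by
  intro compositeUnit _ hpre
  obtain ⟨hspecB, hcount⟩ := hpre
  have hspec : ∀ ch ∈ pvSpecials, ch ∉ compositeUnit.toList := by simpa using hspecB
  unfold Spec_splitCompositeUnit_py
  unfold splitCompositeUnit_py splitCompositeUnit_py_alt
  rw [specials_guard_false compositeUnit hspec]
  simp only [Bool.false_eq_true, if_false]
  set s := PySem.Str.replace compositeUnit " " "" with hs
  have hslist : s.toList = compositeUnit.toList.filter (fun d => !(d == ' ')) := by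
    rw [hs, PySem.Str.toList_replace]
    simpa using replace_single_empty ' ' compositeUnit.toList
  have hsub : List.Sublist s.toList compositeUnit.toList := by
    rw [hslist]; simp [List.filter_sublist]
  have hcount' : s.toList.count '/' ≤ 1 := le_trans (hsub.count_le '/') hcount
  have hspecS : ∀ c ∈ s.toList, c ∉ pvSpecials := fun c hc hcs =>
    hspec c hcs (hsub.mem hc)
  have hspS : ∀ c ∈ s.toList, c ≠ ' ' := by
    rw [hslist]; intro c hc
    have := (List.mem_filter.mp hc).2
    simpa using this
  have hBscan : altScan compositeUnit.toList [] [] [] false =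
      altScan s.toList [] [] [] false := by
    rw [altScan_filter, hslist]
  by_cases hin : PySem.Str.isIn "/" s = true
  · -- a slash is present: s = u ++ '/' :: v with '/' in neither part
    have hmem : '/' ∈ s.toList := by
      have h1 := hin
      simp only [PySem.Str.isIn, slash_toList] at h1
      exact (isIn_singleton '/' s.toList).mp h1
    obtain ⟨u, v, hsplit, hu, hv⟩ := exists_unique_split '/' s.toList hcount' hmem
    have hfind : PySem.Str.find s "/" = (u.length : Int) := by
      simp only [PySem.Str.find, slash_toList]
      rw [hsplit]
      exact find_append '/' u v hu
    have hupper : (PySem.Str.slice s (some 0) (some (PySem.Str.find s "/"))).toList = u := by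
      simp only [PySem.Str.slice, String.toList_ofList, hfind,
        PySem.Chars.slice_eq_listSlice, PySem.List.slice_zero_start]
      rw [PySem.List.slice_to _ (by positivity), hsplit]
      simp
    have hlower : (PySem.Str.slice s (some (PySem.Str.find s "/" + 1)) none).toList = v := by
      simp only [PySem.Str.slice, String.toList_ofList, hfind,
        PySem.Chars.slice_eq_listSlice]
      rw [PySem.List.slice_from _ (by positivity), hsplit]
      have h2 : ((u.length : Int) + 1).toNat = (u ++ ['/']).length := by simp
      rw [h2]
      have h3 : u ++ '/' :: v = (u ++ ['/']) ++ v := by simp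
      rw [h3, List.drop_left]
    have hguard :
        (PySem.Str.isIn "/" (PySem.Str.slice s (some 0) (some (PySem.Str.find s "/"))) ||
         PySem.Str.isIn "/" (PySem.Str.slice s (some (PySem.Str.find s "/" + 1)) none)) = false := by
      rw [Bool.or_eq_false_iff]
      constructor
      · simp only [PySem.Str.isIn, slash_toList, hupper]
        exact isIn_singleton_eq_false '/' u hu
      · simp only [PySem.Str.isIn, slash_toList, hlower]
        exact isIn_singleton_eq_false '/' v hv
    rw [if_pos hin, hguard]
    simp only [Bool.false_eq_true, if_false]
    -- B's side: the scan produces exactly the dash-tokens of u and v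
    have hu1 : ∀ c ∈ u, c ∉ pvSpecials := fun c hc => hspecS c (by rw [hsplit]; simp [hc])
    have hu2 : ∀ c ∈ u, c ≠ ' ' := fun c hc => hspS c (by rw [hsplit]; simp [hc])
    have hv1 : ∀ c ∈ v, c ∉ pvSpecials := fun c hc => hspecS c (by rw [hsplit]; simp [hc])
    have hv2 : ∀ c ∈ v, c ≠ ' ' := fun c hc => hspS c (by rw [hsplit]; simp [hc])
    rw [hBscan, hsplit, altScan_slash u v [] [] [] hu1 hu2 hu hv1 hv2 hv]
    -- A's side: the two slices split on '-'
    have hupperS : pySplit (PySem.Str.slice s (some 0) (some (PySem.Str.find s "/"))) "-" =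
        (mySplit '-' u []).map String.ofList := by
      unfold pySplit
      rw [dash_toList, hupper, splitOn_eq_mySplit]
    have hlowerS : pySplit (PySem.Str.slice s (some (PySem.Str.find s "/" + 1)) none) "-" =
        (mySplit '-' v []).map String.ofList := by
      unfold pySplit
      rw [dash_toList, hlower, splitOn_eq_mySplit]
    rw [hupperS, hlowerS]
    simp
  · -- no slash: B's scan never flips the flag, lower stays []
    rw [if_neg hin]
    have hnm : '/' ∉ s.toList := by
      intro hmem
      apply hin
      simp only [PySem.Str.isIn, slash_toList]
      exact (isIn_singleton '/' s.toList).mpr hmem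
    rw [hBscan, altScan_noSlash_false s.toList [] [] [] hspecS hspS hnm]
    unfold pySplit
    rw [dash_toList, splitOn_eq_mySplit]
    simp
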